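-- pv_equiv track=rewrite | github.com/CatalyteTraining-ClassroomContent/python-capstone-nsmith-catalyte | requirements.py | find_unsubmitted
-- ===== SOURCE A (Python) =====
-- def find_unsubmitted(date, list_of_student_names, list_of_submissions):
--     """
--     Given I have a list of submission objects, when I supply a date, a list of student
--     names, and a list of submission objects to the find_unsubmitted
--     function, then I am returned a list of names of students that have not completed
--     any quiz on that date.
--     2. Given that the find unsubmitted feature does not find any student names, I am
--     returned an empty list.
--     returns:
--     "names of students that have not completed any quiz on that date."
--     """
--     if not list_of_student_names:
--         return []
--     user_chosen_names = set()
--     for submission in list_of_submissions: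
--         if submission["submissionDate"] == date:
--             user_chosen_names.add(submission["studentName"])
--     unsubmitted = []
--     for student in list_of_student_names:
--         if student not in user_chosen_names:
--             unsubmitted.append(student)
--     return unsubmitted
-- ===== SOURCE B (Python) =====
-- def find_unsubmitted(date, list_of_student_names, list_of_submissions):
--     return [student for student in list_of_student_names
--             if not any(s["submissionDate"] == date and s["studentName"] == student
--                        for s in list_of_submissions)]
-- ===== Notes on version B (the rewrite author's own statement) =====
-- stated objective: simpler
-- what changed: Drops A's pre-built set of that day's submitters and its empty-list guard; B is a single comprehension that keeps a student iff no submission matches both the date and that student (per-student scan of the submissions).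
import Mathlib
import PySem

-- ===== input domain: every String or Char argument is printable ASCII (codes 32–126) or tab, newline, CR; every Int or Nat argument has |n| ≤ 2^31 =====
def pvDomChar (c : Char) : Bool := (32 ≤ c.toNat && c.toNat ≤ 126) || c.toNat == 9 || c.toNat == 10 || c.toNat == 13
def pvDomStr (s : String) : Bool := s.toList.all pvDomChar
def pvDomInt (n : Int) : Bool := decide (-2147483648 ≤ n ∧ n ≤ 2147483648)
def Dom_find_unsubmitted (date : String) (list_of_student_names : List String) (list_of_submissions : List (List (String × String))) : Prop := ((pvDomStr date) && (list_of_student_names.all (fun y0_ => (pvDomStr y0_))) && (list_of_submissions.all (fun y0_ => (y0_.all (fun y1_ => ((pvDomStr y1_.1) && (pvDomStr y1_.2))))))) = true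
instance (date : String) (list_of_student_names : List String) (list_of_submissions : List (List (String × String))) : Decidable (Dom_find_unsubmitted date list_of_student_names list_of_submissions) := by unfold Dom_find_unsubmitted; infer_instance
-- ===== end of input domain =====

-- B replaces A's pre-built submitter set (and its empty-list guard) by a single filter with a
-- per-student scan of the submissions; objective: simpler. Same return value on all of Pre_.

-- ===== PORT A =====
def find_unsubmitted (date : String) (list_of_student_names : List String) (list_of_submissions : List (List (String × String))) : List String :=
  if list_of_student_names = [] then []
  else
    -- for submission in list_of_submissions: if submission["submissionDate"] == date: chosen.add(submission["studentName"])
    -- (key lookups are total via getD ""; Pre_ guarantees the keys are present, matching Python's KeyError-free runs)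
    let user_chosen_names : PySem.Set String :=
      list_of_submissions.foldl
        (fun acc submission =>
          if ((PySem.Dict.mk submission).get? "submissionDate").getD "" = date then
            PySem.Set.add acc (((PySem.Dict.mk submission).get? "studentName").getD "")
          else acc)
        PySem.Set.empty
    -- for student in names: if student not in chosen: unsubmitted.append(student)
    list_of_student_names.foldl
      (fun acc student =>
        if !(PySem.Set.contains user_chosen_names student) then acc ++ [student] else acc)
      []

-- ===== PORT B =====
def find_unsubmitted_alt (date : String) (list_of_student_names : List String) (list_of_submissions : List (List (String × String))) : List String :=
  list_of_student_names.filter (fun student =>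
    !(list_of_submissions.any (fun s =>
        ((PySem.Dict.mk s).get? "submissionDate").getD "" == date &&
        ((PySem.Dict.mk s).get? "studentName").getD "" == student)))

-- ===== PRECONDITION & SPEC =====
-- Pre_ excludes exactly the inputs on which Python A raises KeyError: a non-empty name list together
-- with a submission lacking "submissionDate", or one matching the date but lacking "studentName".
def Pre_find_unsubmitted (date : String) (list_of_student_names : List String) (list_of_submissions : List (List (String × String))) : Prop :=
  list_of_student_names = [] ∨
    ∀ s ∈ list_of_submissions,
      ((PySem.Dict.mk s).get? "submissionDate").isSome ∧
      ((PySem.Dict.mk s).get? "submissionDate" = some date → ((PySem.Dict.mk s).get? "studentName").isSome)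
instance (date : String) (list_of_student_names : List String) (list_of_submissions : List (List (String × String))) : Decidable (Pre_find_unsubmitted date list_of_student_names list_of_submissions) := by unfold Pre_find_unsubmitted; infer_instance
def pvWitness_find_unsubmitted : String × List String × (List (List (String × String))) :=
  ("2020-01-01", ["alice", "bob"], [[("submissionDate", "2020-01-01"), ("studentName", "alice")]])

def Spec_find_unsubmitted (date : String) (list_of_student_names : List String) (list_of_submissions : List (List (String × String))) (out : List String) : Prop := out = find_unsubmitted_alt date list_of_student_names list_of_submissions
instance (date : String) (list_of_student_names : List String) (list_of_submissions : List (List (String × String))) (out : List String) : Decidable (Spec_find_unsubmitted date list_of_student_names list_of_submissions out) := by unfold Spec_find_unsubmitted; infer_instance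

-- ===== CLAIM (what is proved, stated in full; the proofs are below) =====
def Claim_equal_find_unsubmitted : Prop := ∀ (date : String) (list_of_student_names : List String) (list_of_submissions : List (List (String × String))), Dom_find_unsubmitted date list_of_student_names list_of_submissions → Pre_find_unsubmitted date list_of_student_names list_of_submissions → Spec_find_unsubmitted date list_of_student_names list_of_submissions (find_unsubmitted date list_of_student_names list_of_submissions)

-- ===== LEMMAS AND PROOFS =====

-- Membership in A's conditionally-built set = existence of a matching submission.
theorem mem_foldl_add_if {subs : List (List (String × String))} {acc : PySem.Set String}
    (p : List (String × String) → Prop) [DecidablePred p] (f : List (String × String) → String) (y : String) :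
    (y ∈ subs.foldl (fun acc s => if p s then PySem.Set.add acc (f s) else acc) acc) ↔
      (y ∈ acc ∨ ∃ s ∈ subs, p s ∧ y = f s) := by
  induction subs generalizing acc with
  | nil => simp
  | cons s rest ih =>
    simp only [List.foldl_cons]
    by_cases hp : p s
    · rw [if_pos hp, ih]
      simp only [PySem.Set.mem_add, List.mem_cons]
      constructor
      · rintro ((h | h) | ⟨t, ht, hpt, hy⟩)
        · exact Or.inl h
        · exact Or.inr ⟨s, Or.inl rfl, hp, h⟩
        · exact Or.inr ⟨t, Or.inr ht, hpt, hy⟩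
      · rintro (h | ⟨t, (rfl | ht), hpt, hy⟩)
        · exact Or.inl (Or.inl h)
        · exact Or.inl (Or.inr hy)
        · exact Or.inr ⟨t, ht, hpt, hy⟩
    · rw [if_neg hp, ih]
      simp only [List.mem_cons]
      constructor
      · rintro (h | ⟨t, ht, hpt, hy⟩)
        · exact Or.inl h
        · exact Or.inr ⟨t, Or.inr ht, hpt, hy⟩
      · rintro (h | ⟨t, (rfl | ht), hpt, hy⟩)
        · exact Or.inl h
        · exact absurd hpt hp
        · exact Or.inr ⟨t, ht, hpt, hy⟩

theorem find_unsubmitted_eq_alt (date : String) (names : List String)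
    (subs : List (List (String × String))) :
    find_unsubmitted date names subs = find_unsubmitted_alt date names subs := by
  unfold find_unsubmitted find_unsubmitted_alt
  by_cases h : names = []
  · simp [h]
  · rw [if_neg h]
    rw [PySem.List.foldl_append_if_eq_filter]
    simp only [List.nil_append]
    apply List.filter_congr
    intro student _
    congr 1
    rw [Bool.eq_iff_iff]
    rw [PySem.Set.contains_iff, mem_foldl_add_if]
    simp [List.any_eq_true, PySem.Set.empty]
    constructor
    · rintro ⟨s, hs, hd, hn⟩; exact ⟨s, hs, hd, hn.symm⟩
    · rintro ⟨s, hs, hd, hn⟩; exact ⟨s, hs, hd, hn.symm⟩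

-- ===== VERDICT (by name: the statement is the Claim_ definition above) =====
theorem find_unsubmitted_spec : Claim_equal_find_unsubmitted := by
  intro date names subs _ _
  unfold Spec_find_unsubmitted
  exact find_unsubmitted_eq_alt date names subs
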